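-- pv_equiv track=rewrite | github.com/alok-108/coupon-code-message-automation | coupon-code-message-automation-code2.py | get_discount
-- ===== SOURCE A (Python) =====
-- def get_discount(days: int) -> int:
--     slabs = [
--         (0,   7,   0),
--         (8,   16, 10),
--         (17,  30, 25),
--         (31,  45, 40),
--         (46,  90, 50),
--         (91, 120, 65),
--         (121,150, 80),
--         (151,175, 90),
--         (176,365, 95),
--     ]
--     for low, high, disc in slabs:
--         if low <= days <= high:
--             return disc
--     return 0
-- ===== SOURCE B (Python) =====
-- import bisect
--
-- _THRESHOLDS = [7, 16, 30, 45, 90, 120, 150, 175, 365]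
-- _DISCOUNTS = [0, 10, 25, 40, 50, 65, 80, 90, 95]
--
-- def get_discount(days: int) -> int:
--     if days < 0 or days > 365:
--         return 0
--     return _DISCOUNTS[bisect.bisect_left(_THRESHOLDS, days)]
-- ===== Notes on version B (the rewrite author's own statement) =====
-- stated objective: idiomatic
-- what changed: Replaced the linear scan over (low, high, disc) slab triples by a guard for out-of-range days plus bisect.bisect_left binary search over an upper-threshold array indexing a parallel discount array.
import Mathlib
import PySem

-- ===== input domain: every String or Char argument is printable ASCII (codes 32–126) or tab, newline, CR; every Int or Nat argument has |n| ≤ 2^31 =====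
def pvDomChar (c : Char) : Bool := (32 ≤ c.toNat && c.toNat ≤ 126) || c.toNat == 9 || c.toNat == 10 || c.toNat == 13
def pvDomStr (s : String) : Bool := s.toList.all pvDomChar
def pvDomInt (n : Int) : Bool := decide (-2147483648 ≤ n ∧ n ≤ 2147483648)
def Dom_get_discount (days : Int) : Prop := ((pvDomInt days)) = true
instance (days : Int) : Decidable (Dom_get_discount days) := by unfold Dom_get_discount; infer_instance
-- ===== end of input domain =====

-- B replaces A's linear scan over slab triples by a range guard plus bisect_left binary
-- search over an upper-threshold array with a parallel discount array (idiomatic).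

-- ===== PORT A =====
-- the for-loop with early return over the slab list
def getDiscountLoop (slabs : List (Int × Int × Int)) (days : Int) : Int :=
  match slabs with
  | [] => 0
  | (low, high, disc) :: rest =>
      if low ≤ days ∧ days ≤ high then disc else getDiscountLoop rest days

def get_discount (days : Int) : Int :=
  getDiscountLoop
    [(0, 7, 0), (8, 16, 10), (17, 30, 25), (31, 45, 40), (46, 90, 50),
     (91, 120, 65), (121, 150, 80), (151, 175, 90), (176, 365, 95)] days

-- ===== PORT B =====
-- transliteration of bisect.bisect_left(a, x) on lo..hi; all indices are nonnegative in
-- Python's bisect, so lo/hi/mid are Nat and (lo+hi)//2 is Nat division (exact here); the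
-- fuel only makes the recursion structural and is never exhausted for the call below
def bisectLeft (a : List Int) (x : Int) (lo hi : Nat) (fuel : Nat) : Nat :=
  match fuel with
  | 0 => lo
  | fuel + 1 =>
      if lo < hi then
        let mid := (lo + hi) / 2
        if a.getD mid 0 < x then bisectLeft a x (mid + 1) hi fuel
        else bisectLeft a x lo mid fuel
      else lo

def bThresholds : List Int := [7, 16, 30, 45, 90, 120, 150, 175, 365]
def bDiscounts : List Int := [0, 10, 25, 40, 50, 65, 80, 90, 95]

def get_discount_alt (days : Int) : Int :=
  if days < 0 ∨ 365 < days then 0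
  else bDiscounts.getD (bisectLeft bThresholds days 0 9 9) 0

-- ===== PRECONDITION & SPEC =====
def Spec_get_discount (days : Int) (out : Int) : Prop := out = get_discount_alt days
instance (days : Int) (out : Int) : Decidable (Spec_get_discount days out) := by unfold Spec_get_discount; infer_instance

-- ===== CLAIM (what is proved, stated in full; the proofs are below) =====
def Claim_equal_get_discount : Prop := ∀ (days : Int), Dom_get_discount days → Spec_get_discount days (get_discount days)

-- ===== LEMMAS AND PROOFS =====

-- ===== VERDICT (by name: the statement is the Claim_ definition above) =====
set_option maxHeartbeats 2000000 in
theorem get_discount_spec : Claim_equal_get_discount := by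
  intro days _
  unfold Spec_get_discount get_discount get_discount_alt
  norm_num [getDiscountLoop, bisectLeft, bThresholds, bDiscounts, List.getD]
  split_ifs <;> simp_all <;> omega
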